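-- pv_equiv track=rewrite | github.com/Wetrain/daily_programmer | sentiment_analysis.py | positive_sentiment
-- ===== SOURCE A (Python) =====
-- def positive_sentiment(comments):
--     count = 0
--     positive_words = ['love','loved','like','liked','awesome','amazing','good','great','excellent', 'brilliant', 'cool']
--     for comment in comments:
--         if comment == None:
--             continue
--         else:
--             for word in comment.split(' '):
--                 if word in positive_words:
--                     count += 1
--     return count
-- ===== SOURCE B (Python) =====
-- POSITIVE_WORDS = 'love loved like liked awesome amazing good great excellent brilliant cool'.split(' ')
--
--
-- def positive_sentiment(comments):
--     texts = [c for c in comments if c is not None]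
--     return sum(text.split(' ').count(w) for w in POSITIVE_WORDS for text in texts)
-- ===== Notes on version B (the rewrite author's own statement) =====
-- stated objective: alternative
-- what changed: B reverses the traversal: it filters the non-None comments once, then loops over the eleven positive words (derived by splitting one vocabulary string) and sums list.count of each word over each comment's space-split tokens, instead of testing every token against the vocabulary inside a counting loop.
import Mathlib
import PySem

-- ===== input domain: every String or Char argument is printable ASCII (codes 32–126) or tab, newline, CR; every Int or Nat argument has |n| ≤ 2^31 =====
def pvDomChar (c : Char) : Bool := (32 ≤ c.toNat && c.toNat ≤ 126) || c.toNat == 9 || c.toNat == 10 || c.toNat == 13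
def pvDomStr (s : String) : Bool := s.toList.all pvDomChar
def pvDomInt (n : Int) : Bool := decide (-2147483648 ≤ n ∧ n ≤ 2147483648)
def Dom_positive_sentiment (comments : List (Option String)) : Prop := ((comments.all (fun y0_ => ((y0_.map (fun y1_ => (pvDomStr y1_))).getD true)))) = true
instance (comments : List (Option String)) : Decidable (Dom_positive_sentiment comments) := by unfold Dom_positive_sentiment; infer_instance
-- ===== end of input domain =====

-- B reverses the traversal: filter the non-None comments once, then loop over the eleven
-- positive words (split out of one vocabulary string) summing list.count per comment
-- (alternative decomposition, same cost).

-- ===== PORT A =====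
-- comment.split(' '): the separator is the nonempty literal " ", so split? is always some
def pvSplitSpace (c : String) : List String := (PySem.Str.split? c " ").getD []

def pvPositiveWords : List String :=
  ["love","loved","like","liked","awesome","amazing","good","great","excellent", "brilliant", "cool"]

-- body of A's outer loop: skip None, else count positive words of the comment
def pvCountWords (count : Int) (comment : Option String) : Int :=
  match comment with
  | none => count
  | some c =>
    (pvSplitSpace c).foldl
      (fun cnt word => if pvPositiveWords.contains word then cnt + 1 else cnt) count

def positive_sentiment (comments : List (Option String)) : Int :=
  comments.foldl pvCountWords 0

-- ===== PORT B =====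
-- module-level: 'love loved … cool'.split(' ')
def pvVocab : List String :=
  (PySem.Str.split? "love loved like liked awesome amazing good great excellent brilliant cool" " ").getD []

-- [c for c in comments if c is not None]
def pvTexts (comments : List (Option String)) : List String := comments.filterMap id

-- sum(text.split(' ').count(w) for w in POSITIVE_WORDS for text in texts)
def positive_sentiment_alt (comments : List (Option String)) : Int :=
  (pvVocab.flatMap (fun w =>
    (pvTexts comments).map (fun text =>
      ((((PySem.Str.split? text " ").getD []).count w : Nat) : Int)))).sum

-- ===== PRECONDITION & SPEC =====
def Spec_positive_sentiment (comments : List (Option String)) (out : Int) : Prop := out = positive_sentiment_alt comments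
instance (comments : List (Option String)) (out : Int) : Decidable (Spec_positive_sentiment comments out) := by unfold Spec_positive_sentiment; infer_instance

-- ===== CLAIM (what is proved, stated in full; the proofs are below) =====
def Claim_equal_positive_sentiment : Prop := ∀ (comments : List (Option String)), Dom_positive_sentiment comments → Spec_positive_sentiment comments (positive_sentiment comments)

-- ===== LEMMAS AND PROOFS =====

-- all words of the non-None comments, in order
def pvWordsOf (comments : List (Option String)) : List String :=
  comments.flatMap (fun comment =>
    match comment with
    | none => []
    | some c => pvSplitSpace c)

lemma pvVocab_eq : pvVocab = pvPositiveWords := by decide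

lemma pvWordsOf_eq (comments : List (Option String)) :
    pvWordsOf comments = (pvTexts comments).flatMap pvSplitSpace := by
  induction comments with
  | nil => simp [pvWordsOf, pvTexts]
  | cons oc rest ih =>
    cases oc <;> simp [pvWordsOf, pvTexts, List.flatMap_cons] at ih ⊢ <;>
      simpa [pvWordsOf, pvTexts] using ih

lemma pvA_foldl (cs : List (Option String)) (acc : Int) :
    cs.foldl pvCountWords acc
    = acc + ((pvWordsOf cs).countP (fun w => pvPositiveWords.contains w) : Int) := by
  induction cs generalizing acc with
  | nil => simp [pvWordsOf]
  | cons oc rest ih =>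
    cases oc with
    | none =>
      rw [List.foldl_cons, ih]
      simp [pvCountWords, pvWordsOf]
    | some c =>
      rw [List.foldl_cons, ih]
      simp only [pvCountWords, PySem.List.foldl_if_add_one, pvWordsOf,
        List.flatMap_cons, List.countP_append]
      push_cast
      ring

-- summing a word's count over the texts = its count over all words
lemma pvCount_flatMap (w : String) (ts : List String) :
    (ts.map (fun text => (((pvSplitSpace text).count w : Nat) : Int))).sum
    = ((ts.flatMap pvSplitSpace).count w : Int) := by
  induction ts with
  | nil => simp
  | cons t ts ih =>
    simp [List.flatMap_cons, List.count_append, ih]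

lemma pvSum_flatMap {α : Type} (l : List α) (f : α → List Int) :
    (l.flatMap f).sum = (l.map (fun a => (f a).sum)).sum := by
  induction l with
  | nil => simp
  | cons a l ih => simp [List.flatMap_cons, ih]

lemma pvSum_count (pw : List String) (hnd : pw.Nodup) (ws : List String) :
    (pw.map (fun w => (ws.count w : Int))).sum
    = ((ws.countP (fun w => pw.contains w) : Nat) : Int) := by
  induction ws with
  | nil => simp
  | cons a ws ih =>
    have hcnt : (pw.map (fun w => (if w == a then 1 else 0 : Int))).sum
        = if pw.contains a then 1 else 0 := by
      rw [PySem.List.sum_map_ite_one_zero]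
      have hb : pw.countP (fun w => w == a) = pw.count a := by
        simp [List.count_eq_countP]
      rw [hb]
      by_cases h : a ∈ pw
      · simp [h, List.count_eq_one_of_mem hnd h]
      · simp [h, List.count_eq_zero_of_not_mem h]
    calc (pw.map (fun w => ((a :: ws).count w : Int))).sum
        = (pw.map (fun w => (ws.count w : Int) + (if w == a then 1 else 0))).sum := by
          congr 1; apply List.map_congr_left; intro w _
          by_cases hw : w = a
          · subst hw; push_cast [List.count_cons]; simp
          · push_cast [List.count_cons]; simp [hw, Ne.symm hw]
      _ = (pw.map (fun w => (ws.count w : Int))).sum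
            + (pw.map (fun w => (if w == a then 1 else 0 : Int))).sum := by
          rw [← List.sum_map_add]
      _ = ((ws.countP (fun w => pw.contains w) : Nat) : Int)
            + (if pw.contains a then 1 else 0) := by rw [ih, hcnt]
      _ = (((a :: ws).countP (fun w => pw.contains w) : Nat) : Int) := by
          rw [List.countP_cons]; push_cast; split <;> simp

-- ===== VERDICT (by name: the statement is the Claim_ definition above) =====
theorem positive_sentiment_spec : Claim_equal_positive_sentiment := by
  intro comments _
  unfold Spec_positive_sentiment positive_sentiment_alt positive_sentiment
  rw [pvA_foldl, zero_add, pvVocab_eq]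
  rw [pvSum_flatMap]
  calc ((pvWordsOf comments).countP (fun w => pvPositiveWords.contains w) : Int)
      = (pvPositiveWords.map
          (fun w => (((pvTexts comments).flatMap pvSplitSpace).count w : Int))).sum := by
        rw [pvSum_count pvPositiveWords (by decide), ← pvWordsOf_eq]
    _ = (pvPositiveWords.map (fun w =>
          ((pvTexts comments).map (fun text =>
            (((pvSplitSpace text).count w : Nat) : Int))).sum)).sum := by
        simp only [pvCount_flatMap]
    _ = _ := by simp [pvSplitSpace]
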